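-- pv_equiv track=rewrite | github.com/AlexBrou/All-Graphs-Generator | main.py | get_all_degree_combinations
-- ===== SOURCE A (Python) =====
-- def get_all_degree_combinations(num_vertices: int, degree_sum: int) -> list[list[int]]:
--     def helper(degree_sum, num_vertices, max_val) -> list[list] | list:
--         if num_vertices == 0 and degree_sum == 0:
--             return [[]]
--         if num_vertices == 0 or degree_sum == 0:
--             return []
--         combinations = []
--         for i in range(min(degree_sum, max_val), 0, -1):
--             for combo in helper(degree_sum - i, num_vertices - 1, i):
--                 combinations.append([i] + combo)
--         return combinations
--
--     return helper(degree_sum, num_vertices, num_vertices - 1)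
-- ===== SOURCE B (Python) =====
-- def get_all_degree_combinations(num_vertices: int, degree_sum: int) -> list[list[int]]:
--     results = []
--     stack = [(degree_sum, num_vertices, num_vertices - 1, [])]
--     while stack:
--         remaining_sum, remaining_parts, max_val, prefix = stack.pop()
--         if remaining_parts == 0 and remaining_sum == 0:
--             results.append(prefix)
--         elif remaining_parts != 0 and remaining_sum != 0:
--             for i in range(1, min(remaining_sum, max_val) + 1):
--                 stack.append((remaining_sum - i, remaining_parts - 1, i, prefix + [i]))
--     return results
-- ===== Notes on version B (the rewrite author's own statement) =====
-- stated objective: alternative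
-- what changed: Replaces A's recursive helper (nested recursion building each suffix list) by an iterative depth-first search over an explicit stack of partial states (remaining_sum, remaining_parts, max_val, prefix), pushing children in ascending order so the pops reproduce A's descending-lexicographic emission order exactly.
import Mathlib
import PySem

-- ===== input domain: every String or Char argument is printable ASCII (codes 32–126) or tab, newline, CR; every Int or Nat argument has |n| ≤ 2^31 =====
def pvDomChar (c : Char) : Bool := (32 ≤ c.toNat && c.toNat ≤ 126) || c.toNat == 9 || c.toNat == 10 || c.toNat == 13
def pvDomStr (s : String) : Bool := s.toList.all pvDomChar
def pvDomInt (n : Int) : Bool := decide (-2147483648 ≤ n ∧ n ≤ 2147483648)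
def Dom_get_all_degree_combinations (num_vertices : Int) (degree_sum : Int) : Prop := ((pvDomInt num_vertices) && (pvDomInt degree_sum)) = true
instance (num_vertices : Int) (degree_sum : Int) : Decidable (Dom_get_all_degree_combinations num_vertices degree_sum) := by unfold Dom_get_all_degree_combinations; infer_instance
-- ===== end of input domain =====

-- B replaces A's recursive helper by an iterative DFS over an explicit stack of partial states
-- (same values, same emission order); objective: alternative decomposition, not speed.

-- ===== PORT A =====
-- A's inner recursive helper, transliterated; the for-loop over range(min(..),0,-1) is a foldl
-- over the same countdown range ('.attach' only carries the membership fact for termination).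
def pvHelperA (degree_sum : Int) (num_vertices : Int) (max_val : Int) : List (List Int) :=
  if num_vertices = 0 ∧ degree_sum = 0 then [[]]
  else if num_vertices = 0 ∨ degree_sum = 0 then []
  else
    (PySem.List.pyRange (min degree_sum max_val) 0 (-1)).attach.foldl
      (fun combinations i =>
        combinations ++
          (pvHelperA (degree_sum - i.1) (num_vertices - 1) i.1).map (fun combo => [i.1] ++ combo))
      []
termination_by degree_sum.toNat + num_vertices.toNat
decreasing_by
  have h := (PySem.List.mem_pyRange_neg_one).1 i.2
  omega

def get_all_degree_combinations (num_vertices : Int) (degree_sum : Int) : List (List Int) :=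
  pvHelperA degree_sum num_vertices (num_vertices - 1)

-- ===== PORT B =====
-- weight of a stack entry, used only to justify termination of the DFS loop
def pvMu (e : Int × Int × Int × List Int) : Nat := e.1.toNat + e.2.1.toNat
def pvW (e : Int × Int × Int × List Int) : Nat := (pvMu e + 1) ^ (pvMu e + 1)

-- termination fact: the children pushed for one popped entry weigh strictly less than it
theorem pvPush_dec (s p mv : Int) (pre : List Int) :
    (((PySem.List.pyRange 1 (min s mv + 1) 1).map
        (fun i => pvW (s - i, p - 1, i, pre ++ [i]))).sum) < pvW (s, p, mv, pre) := by
  have hWpos : 0 < pvW (s, p, mv, pre) := Nat.pow_pos (Nat.succ_pos _)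
  by_cases hk : min s mv ≤ 0
  · rw [PySem.List.pyRange_one_eq_nil (by omega)]
    simpa using hWpos
  · set μ : Nat := pvMu (s, p, mv, pre) with hμ
    have hs1 : 1 ≤ s := le_trans (by omega) (min_le_left s mv)
    have hμ1 : 1 ≤ μ := by simp [hμ, pvMu]; omega
    have hbound : ∀ x ∈ (PySem.List.pyRange 1 (min s mv + 1) 1).map
        (fun i => pvW (s - i, p - 1, i, pre ++ [i])), x ≤ μ ^ μ := by
      intro x hx
      rcases List.mem_map.1 hx with ⟨i, hi, rfl⟩
      have hi' := (PySem.List.mem_pyRange_one).1 hi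
      have hile : i ≤ s := le_trans (by omega) (min_le_left s mv)
      have hc : pvMu (s - i, p - 1, i, pre ++ [i]) + 1 ≤ μ := by
        simp [pvMu, hμ]; omega
      calc pvW (s - i, p - 1, i, pre ++ [i])
          ≤ μ ^ (pvMu (s - i, p - 1, i, pre ++ [i]) + 1) :=
            Nat.pow_le_pow_left hc _
        _ ≤ μ ^ μ := Nat.pow_le_pow_right (by omega) hc
    have hlen : ((PySem.List.pyRange 1 (min s mv + 1) 1).map
        (fun i => pvW (s - i, p - 1, i, pre ++ [i]))).length ≤ μ := by
      rw [List.length_map, PySem.List.length_pyRange_one]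
      have : min s mv ≤ s := min_le_left s mv
      simp [pvMu, hμ]; omega
    have hsum := List.sum_le_card_nsmul _ (μ ^ μ) hbound
    have : (((PySem.List.pyRange 1 (min s mv + 1) 1).map
        (fun i => pvW (s - i, p - 1, i, pre ++ [i]))).sum) ≤ μ * μ ^ μ := by
      refine le_trans hsum ?_
      simpa [smul_eq_mul] using Nat.mul_le_mul_right (μ ^ μ) hlen
    calc (((PySem.List.pyRange 1 (min s mv + 1) 1).map
        (fun i => pvW (s - i, p - 1, i, pre ++ [i]))).sum)
        ≤ μ * μ ^ μ := this
      _ = μ ^ (μ + 1) := by rw [pow_succ, Nat.mul_comm]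
      _ < (μ + 1) ^ (μ + 1) := Nat.pow_lt_pow_left (Nat.lt_succ_self μ) (Nat.succ_ne_zero μ)
      _ = pvW (s, p, mv, pre) := rfl

-- the DFS loop of Source B: stack head = Python stack top; pushing i ascending puts the largest on top
def pvLoopB (stack : List (Int × Int × Int × List Int)) (results : List (List Int)) :
    List (List Int) :=
  match stack with
  | [] => results
  | (remaining_sum, remaining_parts, max_val, pfx) :: rest =>
    if remaining_parts = 0 ∧ remaining_sum = 0 then
      pvLoopB rest (results ++ [pfx])
    else if remaining_parts ≠ 0 ∧ remaining_sum ≠ 0 then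
      pvLoopB
        (((PySem.List.pyRange 1 (min remaining_sum max_val + 1) 1).map
            (fun i => (remaining_sum - i, remaining_parts - 1, i, pfx ++ [i]))).reverse ++ rest)
        results
    else
      pvLoopB rest results
termination_by (stack.map pvW).sum
decreasing_by
  · have h : 0 < pvW (remaining_sum, remaining_parts, max_val, pfx) := Nat.pow_pos (Nat.succ_pos _)
    simp only [List.map_cons, List.sum_cons]
    omega
  · have h := pvPush_dec remaining_sum remaining_parts max_val pfx
    simp only [List.map_append, List.sum_append, List.map_cons, List.sum_cons, List.map_reverse,
      List.sum_reverse, List.map_map, Function.comp_def] at h ⊢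
    omega
  · have h : 0 < pvW (remaining_sum, remaining_parts, max_val, pfx) := Nat.pow_pos (Nat.succ_pos _)
    simp only [List.map_cons, List.sum_cons]
    omega

def get_all_degree_combinations_alt (num_vertices : Int) (degree_sum : Int) : List (List Int) :=
  pvLoopB [(degree_sum, num_vertices, num_vertices - 1, [])] []

-- ===== PRECONDITION & SPEC =====
def Spec_get_all_degree_combinations (num_vertices : Int) (degree_sum : Int) (out : List (List Int)) : Prop := out = get_all_degree_combinations_alt num_vertices degree_sum
instance (num_vertices : Int) (degree_sum : Int) (out : List (List Int)) : Decidable (Spec_get_all_degree_combinations num_vertices degree_sum out) := by unfold Spec_get_all_degree_combinations; infer_instance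

-- ===== CLAIM (what is proved, stated in full; the proofs are below) =====
def Claim_equal_get_all_degree_combinations : Prop := ∀ (num_vertices : Int) (degree_sum : Int), Dom_get_all_degree_combinations num_vertices degree_sum → Spec_get_all_degree_combinations num_vertices degree_sum (get_all_degree_combinations num_vertices degree_sum)

-- ===== LEMMAS AND PROOFS =====

-- what one stack entry contributes to B's output, expressed through A's helper
def pvEmit (e : Int × Int × Int × List Int) : List (List Int) :=
  (pvHelperA e.1 e.2.1 e.2.2.1).map (fun c => e.2.2.2 ++ c)

theorem pvHelperA_flatMap (s p mv : Int) (hp : p ≠ 0) (hs : s ≠ 0) :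
    pvHelperA s p mv =
      (PySem.List.pyRange (min s mv) 0 (-1)).flatMap
        (fun i => (pvHelperA (s - i) (p - 1) i).map (fun combo => [i] ++ combo)) := by
  rw [pvHelperA, if_neg (by tauto), if_neg (by tauto)]
  rw [List.foldl_attach
    (f := fun combinations i =>
      combinations ++ (pvHelperA (s - i) (p - 1) i).map (fun combo => [i] ++ combo))]
  exact List.flatMap_eq_foldl.symm

theorem pvLoopB_eq (stack : List (Int × Int × Int × List Int)) (results : List (List Int)) :
    pvLoopB stack results = results ++ stack.flatMap pvEmit := by
  fun_induction pvLoopB stack results with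
  | case1 res => simp
  | case2 res rs rp mv pre rest h ih =>
    rw [ih]
    obtain ⟨hp0, hs0⟩ := h
    subst hp0; subst hs0
    have he : pvEmit (0, 0, mv, pre) = [pre] := by
      simp only [pvEmit]
      rw [pvHelperA.eq_def]
      simp
    simp [he, List.append_assoc]
  | case3 res rs rp mv pre rest h1 h2 ih =>
    rw [ih, List.flatMap_append, List.flatMap_cons]
    congr 1
    have he : pvEmit (rs, rp, mv, pre) =
        ((PySem.List.pyRange (min rs mv) 0 (-1)).flatMap
          (fun i => (pvHelperA (rs - i) (rp - 1) i).map (fun combo => [i] ++ combo))).map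
            (fun c => pre ++ c) := by
      simp only [pvEmit]
      rw [pvHelperA_flatMap rs rp mv h2.1 h2.2]
    rw [he, PySem.List.pyRange_neg_one_eq_reverse, ← List.map_reverse, List.flatMap_map]
    simp [List.map_flatMap, List.map_map, Function.comp_def, List.append_assoc, pvEmit]
  | case4 res rs rp mv pre rest h1 h2 ih =>
    rw [ih]
    have he : pvEmit (rs, rp, mv, pre) = [] := by
      simp only [pvEmit]
      rw [pvHelperA.eq_def, if_neg h1, if_pos (by tauto)]
      rfl
    simp [he]

-- ===== VERDICT (by name: the statement is the Claim_ definition above) =====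
theorem get_all_degree_combinations_spec : Claim_equal_get_all_degree_combinations := by
  intro nv ds _
  unfold Spec_get_all_degree_combinations
  rw [get_all_degree_combinations_alt, pvLoopB_eq]
  simp [pvEmit, get_all_degree_combinations]
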